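-- pv_equiv track=rewrite | github.com/google-research/meliad | transformer/text_dataset.py | _open_vocab_segment_before_space
-- ===== SOURCE A (Python) =====
-- from typing import (Any, Callable, Dict, Iterable, List, Mapping, Optional,
--                     Sequence, Set, Tuple, Union)
--
-- def _open_vocab_segment_before_space(atext: str) -> List[int]:
--   """Add segmentation boundaries at end of word, just before each space."""
--   max_word_length = 8
--   next_atext = atext[1:] + "a"
--   seg = []
--   wlen = 0
--   seg_i: bool
--   for (c, nc) in zip(atext, next_atext):
--     if c.isalpha():
--       if nc.isalpha():
--         seg_i = False
--       else:
--         seg_i = True       # EOW on last character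
--     elif not c.isspace():  # c is a "symbol" if it is not alpha, and not space.
--       seg_i = True         # EOW after every symbol
--     else:
--       seg_i = False
--
--     if seg_i or wlen >= max_word_length:
--       seg.append(1)
--       wlen = 0             # reset word length
--     else:
--       seg.append(0)
--       wlen = wlen + 1      # increment word length
--   return seg
-- ===== SOURCE B (Python) =====
-- def _open_vocab_segment_before_space(atext: str):
--   """Boundary-index algorithm: find intrinsic end-of-word positions, then emit each
--   gap's output as a closed-form modular 0/1 pattern (a 1 every 9th char of a run)
--   instead of maintaining a per-character word-length counter."""
--   n = len(atext)
--
--   def is_boundary(i):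
--     c = atext[i]
--     nc = atext[i + 1] if i + 1 < n else 'a'
--     return (not nc.isalpha()) if c.isalpha() else (not c.isspace())
--
--   def pat(g):
--     # run of g non-boundary chars starting fresh: forced 1 at every 9th position
--     return [1 if (j + 1) % 9 == 0 else 0 for j in range(g)]
--
--   out = []
--   prev = -1
--   for i in [i for i in range(n) if is_boundary(i)]:
--     out += pat(i - prev - 1)
--     out.append(1)
--     prev = i
--   out += pat(n - 1 - prev)
--   return out
-- ===== Notes on version B (the rewrite author's own statement) =====
-- stated objective: alternative
-- what changed: Replaces A's per-character word-length counter loop with a boundary-index algorithm: collect the intrinsic end-of-word positions, then emit each inter-boundary gap's output as a closed-form modular 0/1 pattern (a forced 1 at every 9th character of a run), so no running counter is maintained.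
import Mathlib
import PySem

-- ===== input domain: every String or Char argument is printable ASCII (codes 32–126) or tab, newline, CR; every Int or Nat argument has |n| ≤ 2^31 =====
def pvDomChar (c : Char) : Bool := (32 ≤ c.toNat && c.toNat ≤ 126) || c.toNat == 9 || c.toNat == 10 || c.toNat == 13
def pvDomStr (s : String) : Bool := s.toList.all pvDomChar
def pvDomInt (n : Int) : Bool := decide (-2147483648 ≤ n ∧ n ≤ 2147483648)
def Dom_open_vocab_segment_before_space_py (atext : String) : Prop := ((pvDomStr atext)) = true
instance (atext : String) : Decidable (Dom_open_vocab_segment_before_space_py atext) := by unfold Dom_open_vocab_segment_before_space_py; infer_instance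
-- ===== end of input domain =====

-- ===== PORT A =====
-- B replaces A's per-character word-length counter with a boundary-index pass emitting
-- closed-form modular patterns per gap; same return value, no speed claim.
-- step of A's loop: state = (seg, wlen), input = (c, nc)
def pvAStep (st : List Int × Int) (p : Char × Char) : List Int × Int :=
  let segI : Bool :=
    if PySem.Chars.isalpha p.1 then
      if PySem.Chars.isalpha p.2 then false else true
    else if !PySem.Chars.isspace p.1 then true else false
  if segI || st.2 ≥ 8 then (st.1 ++ [1], (0 : Int)) else (st.1 ++ [0], st.2 + 1)

def open_vocab_segment_before_space_py (atext : String) : List Int :=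
  let cs := atext.toList
  let next_atext := PySem.List.slice cs (some 1) none ++ ['a']
  ((cs.zip next_atext).foldl pvAStep ([], 0)).1

-- ===== PORT B =====
-- is_boundary(i): atext[i+1] if i+1 < n else 'a' is ported via getD (i < n always holds at call sites)
def pvBnd (cs : List Char) (i : Nat) : Bool :=
  let c := cs.getD i 'a'
  let nc := cs.getD (i + 1) 'a'
  if PySem.Chars.isalpha c then !PySem.Chars.isalpha nc else !PySem.Chars.isspace c

-- pat(g): [1 if (j+1) % 9 == 0 else 0 for j in range(g)]; g ≥ 0 at every call site,
-- so range(g) is range g.toNat and the Nat modulus agrees with Python's on j ≥ 0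
def pvPat (g : Int) : List Int :=
  (List.range g.toNat).map (fun j => if (j + 1) % 9 == 0 then (1 : Int) else 0)

def pvBStep (st : List Int × Int) (i : Nat) : List Int × Int :=
  (st.1 ++ pvPat ((i : Int) - st.2 - 1) ++ [1], (i : Int))

def open_vocab_segment_before_space_py_alt (atext : String) : List Int :=
  let cs := atext.toList
  let n := cs.length
  let bidx := (List.range n).filter (pvBnd cs)
  let st := bidx.foldl pvBStep ([], -1)
  st.1 ++ pvPat ((n : Int) - 1 - st.2)

-- ===== PRECONDITION & SPEC =====
def Spec_open_vocab_segment_before_space_py (atext : String) (out : List Int) : Prop := out = open_vocab_segment_before_space_py_alt atext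
instance (atext : String) (out : List Int) : Decidable (Spec_open_vocab_segment_before_space_py atext out) := by unfold Spec_open_vocab_segment_before_space_py; infer_instance

-- ===== CLAIM (what is proved, stated in full; the proofs are below) =====
def Claim_equal_open_vocab_segment_before_space_py : Prop := ∀ (atext : String), Dom_open_vocab_segment_before_space_py atext → Spec_open_vocab_segment_before_space_py atext (open_vocab_segment_before_space_py atext)

-- ===== LEMMAS AND PROOFS =====

-- proof-side characterisation of A's loop output as a function of the boundary flags
def pvAltFlag (c nc : Char) : Bool :=
  if PySem.Chars.isalpha c then !PySem.Chars.isalpha nc else !PySem.Chars.isspace c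

def pvAltCount : List Bool → Int → List Int
  | [], _ => []
  | f :: fs, wlen =>
    if f || wlen ≥ 8 then 1 :: pvAltCount fs 0 else 0 :: pvAltCount fs (wlen + 1)

-- proof-side: absolute positions of the `true` flags when fl occupies positions p, p+1, …
def pvT : List Bool → Nat → List Nat
  | [], _ => []
  | b :: bs, p => if b then p :: pvT bs (p + 1) else pvT bs (p + 1)

lemma pvAStep_eq (st : List Int × Int) (p : Char × Char) :
    pvAStep st p =
      if pvAltFlag p.1 p.2 || st.2 ≥ 8 then (st.1 ++ [1], (0 : Int)) else (st.1 ++ [0], st.2 + 1) := by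
  simp only [pvAStep, pvAltFlag]
  by_cases h1 : PySem.Chars.isalpha p.1 <;>
    by_cases h2 : PySem.Chars.isalpha p.2 <;>
    by_cases h3 : PySem.Chars.isspace p.1 <;>
    simp [h1, h2, h3]

lemma pvFold_eq (ps : List (Char × Char)) (acc : List Int) (wlen : Int) :
    (ps.foldl pvAStep (acc, wlen)).1 =
      acc ++ pvAltCount (ps.map (fun p => pvAltFlag p.1 p.2)) wlen := by
  induction ps generalizing acc wlen with
  | nil => simp [pvAltCount]
  | cons p ps ih =>
    simp only [List.foldl_cons, List.map_cons, pvAltCount, pvAStep_eq]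
    by_cases h : (pvAltFlag p.1 p.2 || wlen ≥ 8) = true
    · simp [h, ih]
    · simp [h, ih]

-- A's zip-derived flag list is the range-indexed boundary list
lemma pvFlags_eq (cs : List Char) :
    (cs.zip (PySem.List.slice cs (some 1) none ++ ['a'])).map (fun p => pvAltFlag p.1 p.2) =
      (List.range cs.length).map (pvBnd cs) := by
  rw [PySem.List.slice_from_one]
  apply List.ext_getElem
  · simp; omega
  · intro i h1 h2
    simp only [List.getElem_map, List.getElem_zip, List.getElem_range]
    have hi : i < cs.length := by simpa using h2
    have hbnd : pvBnd cs i = pvAltFlag (cs.getD i 'a') (cs.getD (i + 1) 'a') := rfl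
    rw [hbnd, List.getD_eq_getElem cs 'a' hi]
    congr 1
    by_cases hl : i + 1 < cs.length
    · rw [List.getElem_append_left (by simp; omega), List.getElem_tail,
        List.getD_eq_getElem cs 'a' hl]
    · rw [List.getElem_append_right (by simp; omega), List.getD_eq_default cs 'a' (by omega)]
      simp

-- counting a run of k falses starting at word length w (< 9)
lemma pvRun (k : Nat) (rest : List Bool) (w : Nat) (hw : w < 9) :
    pvAltCount (List.replicate k false ++ rest) (w : Int) =
      (List.range k).map (fun j => if (w + j + 1) % 9 == 0 then (1 : Int) else 0) ++
        pvAltCount rest (((w + k) % 9 : Nat) : Int) := by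
  induction k generalizing w with
  | zero => simp [Nat.mod_eq_of_lt hw]
  | succ k ih =>
    rw [List.replicate_succ, List.cons_append]
    by_cases hw8 : w = 8
    · subst hw8
      simp only [pvAltCount, Bool.false_or]
      rw [if_pos (by norm_num)]
      have h0 := ih 0 (by omega)
      rw [show ((0 : Nat) : Int) = 0 from rfl] at h0
      rw [h0, List.range_succ_eq_map, List.map_cons, List.map_map]
      rw [show ((8 + 0 + 1) % 9 == 0) = true from rfl]
      have hf : ((fun j => if (8 + j + 1) % 9 == 0 then (1 : Int) else 0) ∘ Nat.succ)
          = fun j => if (0 + j + 1) % 9 == 0 then (1 : Int) else 0 := by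
        funext j
        have h : (8 + (j + 1) + 1) % 9 = (0 + j + 1) % 9 := by omega
        simp only [Function.comp, Nat.succ_eq_add_one, h]
      have hm : (0 + k) % 9 = (8 + (k + 1)) % 9 := by omega
      rw [hf, hm]
      rfl
    · simp only [pvAltCount, Bool.false_or]
      rw [if_neg (by simp only [ge_iff_le, decide_eq_true_eq, not_le]; exact_mod_cast (by omega : w < 8))]
      have h1 := ih (w + 1) (by omega)
      rw [show ((w + 1 : Nat) : Int) = (w : Int) + 1 by push_cast; ring] at h1
      rw [h1, List.range_succ_eq_map, List.map_cons, List.map_map]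
      have hf : ((fun j => if (w + j + 1) % 9 == 0 then (1 : Int) else 0) ∘ Nat.succ)
          = fun j => if ((w + 1) + j + 1) % 9 == 0 then (1 : Int) else 0 := by
        funext j
        have h : (w + (j + 1) + 1) % 9 = ((w + 1) + j + 1) % 9 := by omega
        simp only [Function.comp, Nat.succ_eq_add_one, h]
      have hm : ((w + 1) + k) % 9 = (w + (k + 1)) % 9 := by omega
      have h00 : ((w + 0 + 1) % 9 == 0) = false := by
        have h : (w + 0 + 1) % 9 ≠ 0 := by omega
        simpa using h
      rw [hf, hm, show ((w + 0 + 1) % 9 == 0) = false from h00]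
      rfl

lemma pvDecomp (fl : List Bool) :
    (∃ k, fl = List.replicate k false) ∨ (∃ k rest, fl = List.replicate k false ++ true :: rest) := by
  induction fl with
  | nil => exact Or.inl ⟨0, rfl⟩
  | cons b bs ih =>
    cases b with
    | true => exact Or.inr ⟨0, bs, rfl⟩
    | false =>
      rcases ih with ⟨k, hk⟩ | ⟨k, rest, hk⟩
      · exact Or.inl ⟨k + 1, by simp [List.replicate_succ, hk]⟩
      · exact Or.inr ⟨k + 1, rest, by simp [List.replicate_succ, hk]⟩

lemma pvT_replicate (k : Nat) (p : Nat) : pvT (List.replicate k false) p = [] := by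
  induction k generalizing p with
  | zero => rfl
  | succ k ih => simp [List.replicate_succ, pvT, ih]

lemma pvT_run (k : Nat) (rest : List Bool) (p : Nat) :
    pvT (List.replicate k false ++ true :: rest) p = (p + k) :: pvT rest (p + k + 1) := by
  induction k generalizing p with
  | zero => simp [pvT]
  | succ k ih =>
    have h1 : p + 1 + k = p + (k + 1) := by omega
    have h2 : p + 1 + k + 1 = p + (k + 1) + 1 := by omega
    simp only [List.replicate_succ, List.cons_append, pvT, if_neg Bool.false_ne_true, ih, h1]

lemma pvT_range (n s : Nat) (f : Nat → Bool) :
    pvT ((List.range' s n).map f) s = (List.range' s n).filter f := by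
  induction n generalizing s with
  | zero => rfl
  | succ n ih =>
    simp only [List.range'_succ, List.map_cons, pvT, List.filter_cons]
    by_cases h : f s <;> simp [h, ih]

-- main correspondence: B's gap-pattern fold equals A's counter recursion
lemma pvG : ∀ (N : Nat) (fl : List Bool), fl.length ≤ N → ∀ (p : Nat) (acc : List Int),
    (let st := (pvT fl p).foldl pvBStep (acc, (p : Int) - 1);
     st.1 ++ pvPat ((p : Int) + fl.length - 1 - st.2)) = acc ++ pvAltCount fl 0 := by
  intro N
  induction N with
  | zero =>
    intro fl hlen p acc
    rw [List.length_eq_zero_iff.mp (Nat.le_zero.mp hlen)]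
    simp [pvT, pvPat, pvAltCount]
  | succ N ih =>
    intro fl hlen p acc
    rcases pvDecomp fl with ⟨k, rfl⟩ | ⟨k, rest, rfl⟩
    · rw [pvT_replicate]
      simp only [List.foldl_nil, List.length_replicate]
      have harg : (p : Int) + (k : Int) - 1 - ((p : Int) - 1) = (k : Int) := by ring
      rw [harg]
      have hrun := pvRun k [] 0 (by omega)
      rw [show ((0 : Nat) : Int) = 0 from rfl] at hrun
      simp only [List.append_nil] at hrun
      rw [hrun]
      simp [pvPat, pvAltCount]
    · have hrest : rest.length ≤ N := by
        simp only [List.length_append, List.length_replicate, List.length_cons] at hlen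
        omega
      rw [pvT_run, List.foldl_cons]
      have hstep : pvBStep (acc, (p : Int) - 1) (p + k) =
          (acc ++ pvPat (k : Int) ++ [1], ((p + k + 1 : Nat) : Int) - 1) := by
        simp only [pvBStep, Prod.mk.injEq]
        refine ⟨?_, by push_cast; ring⟩
        congr 2
        push_cast
        ring_nf
      rw [hstep]
      have hih := ih rest hrest (p + k + 1) (acc ++ pvPat (k : Int) ++ [1])
      simp only at hih ⊢
      have harg : ∀ z : Int, (p : Int) + ((List.replicate k false ++ true :: rest).length : Int) - 1 - z
          = ((p + k + 1 : Nat) : Int) + (rest.length : Int) - 1 - z := by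
        intro z
        simp only [List.length_append, List.length_replicate, List.length_cons]
        push_cast; ring
      rw [harg, hih]
      have hrun := pvRun k (true :: rest) 0 (by omega)
      rw [show ((0 : Nat) : Int) = 0 from rfl] at hrun
      rw [hrun]
      have htrue : pvAltCount (true :: rest) (((0 + k) % 9 : Nat) : Int) = 1 :: pvAltCount rest 0 := by
        simp [pvAltCount]
      rw [htrue]
      simp [pvPat, List.append_assoc]

-- ===== VERDICT (by name: the statement is the Claim_ definition above) =====
theorem open_vocab_segment_before_space_py_spec : Claim_equal_open_vocab_segment_before_space_py := by
  intro atext _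
  show open_vocab_segment_before_space_py atext = open_vocab_segment_before_space_py_alt atext
  simp only [open_vocab_segment_before_space_py, open_vocab_segment_before_space_py_alt]
  rw [pvFold_eq, pvFlags_eq, List.nil_append]
  have h := pvG (atext.toList.length) ((List.range atext.toList.length).map (pvBnd atext.toList))
    (by simp) 0 []
  rw [List.range_eq_range'] at h ⊢
  rw [pvT_range] at h
  simpa using h.symm
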